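-- pv_equiv track=rewrite | github.com/mashmool0/AI-SearchAlgorithm-SBU-Project | implemented_agents.py | best_node_for_expand
-- ===== SOURCE A (Python) =====
-- def best_node_for_expand(open_list: list, close_list: list):
--     best_node_num = 10000
--     best_node = ()
--
--     for item in open_list:
--         if item not in close_list:
--             if open_list[item] < best_node_num:
--                 best_node_num = open_list[item]
--                 best_node = item
--
--     return best_node
-- ===== SOURCE B (Python) =====
-- def best_node_for_expand(open_list: list, close_list: list):
--     # sort the frontier keys by value (stable), then take the first eligible one
--     order = sorted(open_list, key=lambda k: open_list[k])
--     for k in order: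
--         if k not in close_list and open_list[k] < 10000:
--             return k
--     return ()
-- ===== Notes on version B (the rewrite author's own statement) =====
-- stated objective: alternative
-- what changed: Replaces A's full min-tracking scan over the frontier keys with a stable sort of the keys by value followed by a linear scan that returns the first key not in close_list with value < 10000 (stability preserves A's first-wins tie-breaking); the scan stops at the first eligible key instead of testing close_list membership for every key.
import Mathlib
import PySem

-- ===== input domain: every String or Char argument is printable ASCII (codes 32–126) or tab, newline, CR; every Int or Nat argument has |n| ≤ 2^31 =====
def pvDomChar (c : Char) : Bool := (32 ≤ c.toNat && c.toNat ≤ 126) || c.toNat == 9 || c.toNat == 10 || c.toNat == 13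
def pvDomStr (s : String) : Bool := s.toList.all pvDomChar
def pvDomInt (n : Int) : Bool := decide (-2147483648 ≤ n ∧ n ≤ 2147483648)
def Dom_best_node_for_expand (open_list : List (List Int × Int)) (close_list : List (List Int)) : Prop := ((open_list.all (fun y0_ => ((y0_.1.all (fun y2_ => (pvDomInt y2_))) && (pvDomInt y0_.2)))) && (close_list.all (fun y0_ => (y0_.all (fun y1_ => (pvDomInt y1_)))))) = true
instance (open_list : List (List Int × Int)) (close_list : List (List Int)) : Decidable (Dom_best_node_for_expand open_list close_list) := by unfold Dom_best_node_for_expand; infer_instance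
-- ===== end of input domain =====

-- B replaces A's min-tracking scan over the frontier by a stable sort of the keys by value
-- followed by a scan for the first eligible key (objective: alternative, not claimed faster).

-- ===== PORT A =====
-- 'open_list[item]' is ported as d.getD item 0; the default 0 is unreachable (item ranges over d.keys).
def best_node_for_expand (open_list : List (List Int × Int)) (close_list : List (List Int)) : List Int :=
  let d := PySem.Dict.ofList open_list
  (d.keys.foldl
    (fun (st : Int × List Int) item =>
      if ¬ (item ∈ close_list) then
        if d.getD item 0 < st.1 then (d.getD item 0, item) else st
      else st)
    (10000, ([] : List Int))).2

-- ===== PORT B =====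
-- the 'for k in order: … return k' loop of Source B
def bestAltLoop (d : PySem.Dict (List Int) Int) (close_list : List (List Int)) : List (List Int) → List Int
  | [] => []
  | k :: rest =>
      if ¬ (k ∈ close_list) ∧ d.getD k 0 < 10000 then k
      else bestAltLoop d close_list rest

def best_node_for_expand_alt (open_list : List (List Int × Int)) (close_list : List (List Int)) : List Int :=
  let d := PySem.Dict.ofList open_list
  let order := PySem.List.sorted d.keys (fun k => d.getD k 0) false
  bestAltLoop d close_list order

-- ===== PRECONDITION & SPEC =====
def Spec_best_node_for_expand (open_list : List (List Int × Int)) (close_list : List (List Int)) (out : List Int) : Prop := out = best_node_for_expand_alt open_list close_list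
instance (open_list : List (List Int × Int)) (close_list : List (List Int)) (out : List Int) : Decidable (Spec_best_node_for_expand open_list close_list out) := by unfold Spec_best_node_for_expand; infer_instance

-- ===== CLAIM (what is proved, stated in full; the proofs are below) =====
def Claim_equal_best_node_for_expand : Prop := ∀ (open_list : List (List Int × Int)) (close_list : List (List Int)), Dom_best_node_for_expand open_list close_list → Spec_best_node_for_expand open_list close_list (best_node_for_expand open_list close_list)

-- ===== LEMMAS AND PROOFS =====

-- first element with minimal f-value (ties go to the earlier element)
def pvFirstMin {α : Type} (f : α → Int) : List α → Option α
  | [] => none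
  | x :: t =>
      match pvFirstMin f t with
      | none => some x
      | some m => if f x ≤ f m then some x else some m

def pvMerge {α : Type} (f : α → Int) : Option α → Option α → Option α
  | none, o => o
  | some a, none => some a
  | some a, some m => if f m < f a then some m else some a

lemma pvFilterMin {α : Type} (f : α → Int) (c : Int) :
    ∀ l : List α,
      pvFirstMin f (l.filter (fun x => decide (f x < c))) =
        (pvFirstMin f l).bind (fun m => if f m < c then some m else none) := by
  intro l
  induction l with
  | nil => simp [pvFirstMin]
  | cons x t ih =>
    by_cases hx : f x < c
    · rw [show (x :: t).filter (fun x => decide (f x < c)) = x :: t.filter (fun x => decide (f x < c)) from by simp [hx]]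
      cases h : pvFirstMin f t with
      | none =>
        have h' : pvFirstMin f (t.filter (fun x => decide (f x < c))) = none := by
          rw [ih, h]; rfl
        simp [pvFirstMin, h', h, hx]
      | some m =>
        by_cases hm : f m < c
        · have h' : pvFirstMin f (t.filter (fun x => decide (f x < c))) = some m := by
            rw [ih, h]; simp [hm]
          simp only [pvFirstMin, h', h]
          split_ifs <;> simp [hx, hm]
        · have h' : pvFirstMin f (t.filter (fun x => decide (f x < c))) = none := by
            rw [ih, h]; simp [hm]
          have hxm : f x ≤ f m := by omega
          simp [pvFirstMin, h', h, hxm, hx]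
    · rw [show (x :: t).filter (fun x => decide (f x < c)) = t.filter (fun x => decide (f x < c)) from by simp [hx]]
      rw [ih]
      cases h : pvFirstMin f t with
      | none => simp [pvFirstMin, h, hx]
      | some m =>
        by_cases hxm : f x ≤ f m
        · simp [pvFirstMin, h, hxm, hx, show ¬ f m < c from by omega]
        · simp [pvFirstMin, h, hxm]

lemma pvScanSpec {α : Type} (f : α → Int) (p' : α → Prop) [DecidablePred p'] :
    ∀ (l : List α) (b : Int) (cur : α),
      (l.foldl (fun st k => if p' k then (if f k < st.1 then (f k, k) else st) else st) (b, cur))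
        = match pvFirstMin f (l.filter (fun k => decide (p' k) && decide (f k < b))) with
          | none => (b, cur)
          | some m => (f m, m) := by
  intro l
  induction l with
  | nil => intro b cur; simp [pvFirstMin]
  | cons k t ih =>
    intro b cur
    simp only [List.foldl_cons, List.filter_cons]
    by_cases hp : p' k
    · by_cases hb : f k < b
      · rw [if_pos hp]
        rw [show (if f k < (b, cur).1 then (f k, k) else (b, cur)) = (f k, k) from by simp [hb]]
        rw [ih (f k) k]
        rw [show (decide (p' k) && decide (f k < b)) = true from by simp [hp, hb]]
        simp only [if_pos rfl]
        have hff : t.filter (fun x => decide (p' x) && decide (f x < f k))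
            = (t.filter (fun x => decide (p' x) && decide (f x < b))).filter (fun x => decide (f x < f k)) := by
          rw [List.filter_filter]
          apply List.filter_congr
          intro x _
          by_cases h1 : p' x <;> by_cases h2 : f x < f k <;> simp [h1, h2] <;> omega
        rw [hff, pvFilterMin]
        cases h : pvFirstMin f (t.filter (fun x => decide (p' x) && decide (f x < b))) with
        | none => simp [pvFirstMin, h]
        | some m =>
          by_cases hmk : f m < f k
          · simp [pvFirstMin, h, hmk, show ¬ f k ≤ f m from by omega]
          · simp [pvFirstMin, h, hmk, show f k ≤ f m from by omega]
      · rw [if_pos hp]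
        rw [show (if f k < (b, cur).1 then (f k, k) else (b, cur)) = (b, cur) from by simp [hb]]
        rw [ih b cur]
        rw [show (decide (p' k) && decide (f k < b)) = false from by simp [hb]]
        simp
    · rw [if_neg hp, ih b cur]
      rw [show (decide (p' k) && decide (f k < b)) = false from by simp [hp]]
      simp

lemma pvInsertBySorted {α : Type} (f : α → Int) (x : α) :
    ∀ l : List α, l.Pairwise (fun a b => f a ≤ f b) →
      (PySem.List.insertBy (fun a b => decide (f a < f b)) x l).Pairwise (fun a b => f a ≤ f b) := by
  intro l
  induction l with
  | nil => intro _; simp [PySem.List.insertBy]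
  | cons y ys ih =>
    intro hp
    rw [List.pairwise_cons] at hp
    obtain ⟨hy, hys⟩ := hp
    by_cases hxy : f x < f y
    · simp only [PySem.List.insertBy, decide_eq_true_eq, if_pos hxy]
      rw [List.pairwise_cons]
      refine ⟨?_, by rw [List.pairwise_cons]; exact ⟨hy, hys⟩⟩
      intro b hb
      rcases List.mem_cons.mp hb with rfl | hb
      · omega
      · have := hy b hb; omega
    · simp only [PySem.List.insertBy, decide_eq_true_eq, if_neg hxy]
      rw [List.pairwise_cons]
      refine ⟨?_, ih hys⟩
      intro b hb
      rcases (PySem.List.mem_insertBy _ _ _ _).mp hb with rfl | hb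
      · omega
      · exact hy b hb

lemma pvFindInsertBy {α : Type} (f : α → Int) (p : α → Bool) (x : α) :
    ∀ l : List α, l.Pairwise (fun a b => f a ≤ f b) →
      List.find? p (PySem.List.insertBy (fun a b => decide (f a < f b)) x l) =
        match List.find? p l with
        | none => if p x then some x else none
        | some a => if p x && decide (f x < f a) then some x else some a := by
  intro l
  induction l with
  | nil => intro _; simp [PySem.List.insertBy]
  | cons y ys ih =>
    intro hp
    rw [List.pairwise_cons] at hp
    obtain ⟨hy, hys⟩ := hp
    by_cases hxy : f x < f y
    · simp only [PySem.List.insertBy, decide_eq_true_eq, if_pos hxy]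
      cases hpx : p x with
      | false =>
        cases hA : List.find? p (y :: ys) with
        | none => simp [hpx, hA]
        | some a => simp [hpx, hA]
      | true =>
        cases hA : List.find? p (y :: ys) with
        | none => simp [hpx, hA]
        | some a =>
          have ha : a ∈ y :: ys := List.mem_of_find?_eq_some hA
          have hya : f y ≤ f a := by
            rcases List.mem_cons.mp ha with rfl | h
            · omega
            · exact hy a h
          have hxa : f x < f a := by omega
          simp [hpx, hA, hxa]
    · simp only [PySem.List.insertBy, decide_eq_true_eq, if_neg hxy]
      cases hpy : p y with
      | true =>
        simp [List.find?_cons, hpy, show ¬ f x < f y from hxy]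
      | false =>
        rw [List.find?_cons_of_neg (by simp [hpy]), List.find?_cons_of_neg (by simp [hpy])]
        exact ih hys

lemma pvFindFoldl {α : Type} (f : α → Int) (p : α → Bool) :
    ∀ (l acc : List α), acc.Pairwise (fun a b => f a ≤ f b) →
      List.find? p (l.foldl (fun acc x => PySem.List.insertBy (fun a b => decide (f a < f b)) x acc) acc)
        = pvMerge f (List.find? p acc) (pvFirstMin f (l.filter p)) := by
  intro l
  induction l with
  | nil =>
    intro acc h
    cases hA : List.find? p acc <;> simp [pvMerge, pvFirstMin, hA]
  | cons x t ih =>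
    intro acc hacc
    simp only [List.foldl_cons]
    rw [ih _ (pvInsertBySorted f x acc hacc)]
    rw [pvFindInsertBy f p x acc hacc]
    simp only [List.filter_cons]
    cases hpx : p x with
    | false =>
      cases hA : List.find? p acc <;> simp [pvMerge, hpx, hA]
    | true =>
      cases hA : List.find? p acc with
      | none =>
        cases hM : pvFirstMin f (t.filter p) with
        | none => simp [pvMerge, pvFirstMin, hpx, hA, hM]
        | some m =>
          by_cases hxm : f x ≤ f m
          · simp [pvMerge, pvFirstMin, hpx, hA, hM, hxm, show ¬ f m < f x from by omega]
          · simp [pvMerge, pvFirstMin, hpx, hA, hM, hxm, show f m < f x from by omega]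
      | some a =>
        by_cases hxa : f x < f a
        · cases hM : pvFirstMin f (t.filter p) with
          | none => simp [pvMerge, pvFirstMin, hpx, hA, hM, hxa]
          | some m =>
            by_cases hxm : f x ≤ f m
            · simp [pvMerge, pvFirstMin, hpx, hA, hM, hxa, hxm, show ¬ f m < f x from by omega]
            · simp [pvMerge, pvFirstMin, hpx, hA, hM, hxa, hxm,
                show f m < f x from by omega, show f m < f a from by omega]
        · cases hM : pvFirstMin f (t.filter p) with
          | none => simp [pvMerge, pvFirstMin, hpx, hA, hM, hxa]
          | some m =>
            by_cases hxm : f x ≤ f m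
            · simp [pvMerge, pvFirstMin, hpx, hA, hM, hxa, hxm, show ¬ f m < f a from by omega]
            · simp [pvMerge, pvFirstMin, hpx, hA, hM, hxa, hxm]

lemma pvFindSorted {α : Type} (f : α → Int) (p : α → Bool) (l : List α) :
    List.find? p (PySem.List.sorted l f false) = pvFirstMin f (l.filter p) := by
  have h := pvFindFoldl f p l [] (by simp)
  rw [PySem.List.sorted_eq_foldl_insertBy] at *
  rw [h]
  rfl

lemma pvAltLoopFind (d : PySem.Dict (List Int) Int) (cl : List (List Int)) :
    ∀ l : List (List Int),
      bestAltLoop d cl l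
        = (List.find? (fun k => decide (¬ (k ∈ cl) ∧ d.getD k 0 < 10000)) l).getD [] := by
  intro l
  induction l with
  | nil => simp [bestAltLoop]
  | cons k rest ih =>
    by_cases h : ¬ (k ∈ cl) ∧ d.getD k 0 < 10000
    · simp [bestAltLoop, h]
    · rw [show bestAltLoop d cl (k :: rest) = bestAltLoop d cl rest from by simp [bestAltLoop, h]]
      rw [List.find?_cons_of_neg (by simpa using h)]
      exact ih

-- ===== VERDICT (by name: the statement is the Claim_ definition above) =====
theorem best_node_for_expand_spec : Claim_equal_best_node_for_expand := by
  intro ol cl _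
  show best_node_for_expand ol cl = best_node_for_expand_alt ol cl
  unfold best_node_for_expand best_node_for_expand_alt
  dsimp only
  rw [pvAltLoopFind, pvFindSorted]
  rw [pvScanSpec (fun k => (PySem.Dict.ofList ol).getD k 0) (fun k => ¬ k ∈ cl)]
  rw [show (fun k => decide (¬ k ∈ cl ∧ (PySem.Dict.ofList ol).getD k 0 < 10000))
        = (fun k => decide (¬ k ∈ cl) && decide ((PySem.Dict.ofList ol).getD k 0 < (10000 : Int))) from by
      funext k; by_cases h1 : k ∈ cl <;> by_cases h2 : (PySem.Dict.ofList ol).getD k 0 < (10000 : Int) <;> simp [h1, h2]]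
  cases h : pvFirstMin (fun k => (PySem.Dict.ofList ol).getD k 0)
      (((PySem.Dict.ofList ol).keys).filter
        (fun k => decide (¬ k ∈ cl) && decide ((PySem.Dict.ofList ol).getD k 0 < (10000 : Int)))) <;>
    simp [h]
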